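-- pv_equiv track=rewrite | github.com/MatheusStepple/Compara-o-de-Valores-Distintos-de-floor-N-i-para-i-1-at-N | program.py | linearMethod
-- ===== SOURCE A (Python) =====
-- def linearMethod(valor):
--     contador = 0
--     total_soma = 0
--     divisor_atual = 1
--
--     while divisor_atual <= valor:
--         resultado_divisao = valor // divisor_atual
--         total_soma += resultado_divisao
--         divisor_atual += 1
--         contador += 1
--
--     return total_soma, contador
-- ===== SOURCE B (Python) =====
-- def linearMethod(valor):
--     # Divisor-block method: floor(valor/k) is constant on blocks [i, valor//(valor//i)],
--     # so the sum is computed in O(sqrt(valor)) block steps; the counter is valor itself.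
--     if valor <= 0:
--         return 0, 0
--     total = 0
--     i = 1
--     while i <= valor:
--         q = valor // i
--         j = valor // q
--         total += q * (j - i + 1)
--         i = j + 1
--     return total, valor
-- ===== Notes on version B (the rewrite author's own statement) =====
-- stated objective: faster
-- what changed: Replaces the i=1..N loop with divisor-block (hyperbola) grouping of equal quotients floor(N/i), and returns the counter N directly instead of counting iterations.
import Mathlib
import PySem

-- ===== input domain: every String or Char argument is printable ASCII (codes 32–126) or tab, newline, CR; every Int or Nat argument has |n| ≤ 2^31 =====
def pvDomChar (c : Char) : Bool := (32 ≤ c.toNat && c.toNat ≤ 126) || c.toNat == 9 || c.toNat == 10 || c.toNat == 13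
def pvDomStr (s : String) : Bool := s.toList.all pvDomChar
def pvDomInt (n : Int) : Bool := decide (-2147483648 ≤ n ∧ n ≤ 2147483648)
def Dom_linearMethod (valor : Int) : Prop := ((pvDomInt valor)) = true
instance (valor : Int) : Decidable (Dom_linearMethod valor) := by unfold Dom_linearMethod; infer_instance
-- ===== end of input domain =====

-- B replaces A's i=1..N loop by divisor-block grouping of equal quotients (O(sqrt N) blocks)
-- and returns the counter N directly; objective: faster (asymptotic).

-- ===== PORT A =====
-- A's while-loop: state (divisor_atual, total_soma, contador)
def pvLoopA (valor d soma cont : Int) : Int × Int :=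
  if d ≤ valor then
    pvLoopA valor (d + 1) (soma + PySem.Int.floordiv valor d) (cont + 1)
  else (soma, cont)
termination_by (valor + 1 - d).toNat
decreasing_by omega

def linearMethod (valor : Int) : Int × Int := pvLoopA valor 1 0 0

-- ===== PORT B =====
-- B's while-loop: state (i, total).  In every reachable state 1 ≤ i, hence i ≤ j;
-- the 'max (j + 1) (i + 1)' is only a totality guard (it equals j + 1 whenever i ≤ j).
def pvLoopB (valor i total : Int) : Int :=
  if i ≤ valor then
    let q := PySem.Int.floordiv valor i
    let j := PySem.Int.floordiv valor q
    pvLoopB valor (max (j + 1) (i + 1)) (total + q * (j - i + 1))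
  else total
termination_by (valor + 1 - i).toNat
decreasing_by omega

def linearMethod_alt (valor : Int) : Int × Int :=
  if valor ≤ 0 then (0, 0) else (pvLoopB valor 1 0, valor)

-- ===== PRECONDITION & SPEC =====
def Spec_linearMethod (valor : Int) (out : Int × Int) : Prop := out = linearMethod_alt valor
instance (valor : Int) (out : Int × Int) : Decidable (Spec_linearMethod valor out) := by unfold Spec_linearMethod; infer_instance

-- ===== CLAIM (what is proved, stated in full; the proofs are below) =====
def Claim_equal_linearMethod : Prop := ∀ (valor : Int), Dom_linearMethod valor → Spec_linearMethod valor (linearMethod valor)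

-- ===== LEMMAS AND PROOFS =====

-- floordiv of nonneg by pos, in Nat terms
theorem pv_fdiv_nonneg (v i : Int) (hv : 0 ≤ v) (hi : 0 < i) :
    PySem.Int.floordiv v i = ((v.toNat / i.toNat : Nat) : Int) := by
  rw [PySem.Int.floordiv_eq_ediv_of_pos hi]
  rw [show v = ((v.toNat : Nat) : Int) by omega, show i = ((i.toNat : Nat) : Int) by omega]
  exact (Int.natCast_ediv v.toNat i.toNat).symm

-- the divisor-block facts, for 1 ≤ i ≤ v
theorem pv_block (v i q j : Int) (hi : 1 ≤ i) (hiv : i ≤ v)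
    (hq : q = PySem.Int.floordiv v i) (hj : j = PySem.Int.floordiv v q) :
    1 ≤ q ∧ i ≤ j ∧ j ≤ v ∧ ∀ k, i ≤ k → k ≤ j → PySem.Int.floordiv v k = q := by
  have hv : 0 ≤ v := by omega
  have hqn : q = ((v.toNat / i.toNat : Nat) : Int) := by
    rw [hq]; exact pv_fdiv_nonneg v i hv (by omega)
  have hq1n : 1 ≤ v.toNat / i.toNat := (Nat.one_le_div_iff (by omega)).2 (by omega)
  have hq0 : 0 < q := by rw [hqn]; exact_mod_cast hq1n
  have hjn : j = ((v.toNat / (v.toNat / i.toNat) : Nat) : Int) := by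
    rw [hj, hqn, pv_fdiv_nonneg v _ hv (by exact_mod_cast hq1n), Int.toNat_natCast]
  refine ⟨hq0, ?_, ?_, ?_⟩
  · rw [hjn]
    have : i.toNat ≤ v.toNat / (v.toNat / i.toNat) := by
      refine (Nat.le_div_iff_mul_le hq1n).2 ?_
      rw [Nat.mul_comm]; exact Nat.div_mul_le_self v.toNat i.toNat
    omega
  · rw [hjn]; have := Nat.div_le_self v.toNat (v.toNat / i.toNat); omega
  · intro k hik hkj
    have hk0 : 0 < k := by omega
    rw [pv_fdiv_nonneg v k hv hk0, hqn]
    have hkle : k.toNat ≤ v.toNat / (v.toNat / i.toNat) := by rw [hjn] at hkj; omega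
    have h1 : v.toNat / k.toNat ≤ v.toNat / i.toNat :=
      Nat.div_le_div_left (by omega) (by omega)
    have h2 : v.toNat / i.toNat ≤ v.toNat / k.toNat := by
      refine (Nat.le_div_iff_mul_le (by omega)).2 ?_
      calc v.toNat / i.toNat * k.toNat
          ≤ v.toNat / i.toNat * (v.toNat / (v.toNat / i.toNat)) :=
            Nat.mul_le_mul_left _ hkle
        _ ≤ v.toNat := by
            rw [Nat.mul_comm]; exact Nat.div_mul_le_self v.toNat (v.toNat / i.toNat)
    congr 1
    omega

-- the first component of A's loop does not depend on the counter
theorem pvLoopA_fst_c (v : Int) : ∀ fuel : Nat, ∀ i s c c', (v + 1 - i).toNat ≤ fuel →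
    (pvLoopA v i s c).1 = (pvLoopA v i s c').1 := by
  intro fuel
  induction fuel with
  | zero =>
    intro i s c c' hf
    have hiv : ¬ i ≤ v := by omega
    rw [pvLoopA, if_neg hiv]; rw [pvLoopA, if_neg hiv]
  | succ f ih =>
    intro i s c c' hf
    by_cases hiv : i ≤ v
    · rw [pvLoopA, if_pos hiv]
      conv_rhs => rw [pvLoopA, if_pos hiv]
      exact ih (i + 1) _ (c + 1) (c' + 1) (by omega)
    · rw [pvLoopA, if_neg hiv]; rw [pvLoopA, if_neg hiv]

-- unroll A's loop across one constant-quotient block [i, j]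
theorem pvLoopA_chunk (v q j : Int) (hjv : j ≤ v) :
    ∀ fuel : Nat, ∀ i s c, 1 ≤ i → i ≤ j + 1 → (j + 1 - i).toNat ≤ fuel →
      (∀ k, i ≤ k → k ≤ j → PySem.Int.floordiv v k = q) →
      (pvLoopA v i s c).1 = (pvLoopA v (j + 1) (s + q * (j + 1 - i)) c).1 := by
  intro fuel
  induction fuel with
  | zero =>
    intro i s c h1 h2 hf _
    have : i = j + 1 := by omega
    subst this
    norm_num
  | succ f ih =>
    intro i s c h1 h2 hf hall
    by_cases hij : i ≤ j
    · rw [pvLoopA, if_pos (by omega), hall i le_rfl hij]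
      rw [pvLoopA_fst_c v (v + 1 - (i + 1)).toNat (i + 1) (s + q) (c + 1) c le_rfl]
      rw [ih (i + 1) (s + q) c (by omega) (by omega) (by omega)
            (fun k hk1 hk2 => hall k (by omega) hk2)]
      ring_nf
    · have : i = j + 1 := by omega
      subst this
      norm_num

-- A's running sum equals B's block loop, from any 1 ≤ i
theorem pvLoopA_sum (v : Int) : ∀ fuel : Nat, ∀ i s c, 1 ≤ i → (v + 1 - i).toNat ≤ fuel →
    (pvLoopA v i s c).1 = pvLoopB v i s := by
  intro fuel
  induction fuel with
  | zero =>
    intro i s c h1 hf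
    have hiv : ¬ i ≤ v := by omega
    rw [pvLoopA, if_neg hiv, pvLoopB, if_neg hiv]
  | succ f ih =>
    intro i s c h1 hf
    by_cases hiv : i ≤ v
    · obtain ⟨hq1, hij, hjv, hall⟩ :=
        pv_block v i (PySem.Int.floordiv v i)
          (PySem.Int.floordiv v (PySem.Int.floordiv v i)) h1 hiv rfl rfl
      rw [pvLoopA_chunk v (PySem.Int.floordiv v i)
            (PySem.Int.floordiv v (PySem.Int.floordiv v i)) hjv
            (PySem.Int.floordiv v (PySem.Int.floordiv v i) + 1 - i).toNat
            i s c h1 (by omega) le_rfl hall]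
      rw [pvLoopB, if_pos hiv]
      simp only [max_eq_left (show i + 1 ≤ PySem.Int.floordiv v (PySem.Int.floordiv v i) + 1 by omega)]
      rw [ih (PySem.Int.floordiv v (PySem.Int.floordiv v i) + 1) _ c (by omega) (by omega)]
      ring_nf
    · rw [pvLoopA, if_neg hiv, pvLoopB, if_neg hiv]

-- A's counter: from state (i, c) with i ≤ v + 1 it finishes at c + (v + 1 - i)
theorem pvLoopA_count (v : Int) : ∀ fuel : Nat, ∀ i s c, i ≤ v + 1 → (v + 1 - i).toNat ≤ fuel →
    (pvLoopA v i s c).2 = c + (v + 1 - i) := by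
  intro fuel
  induction fuel with
  | zero => intro i s c h1 hf; rw [pvLoopA, if_neg (by omega)]; simp; omega
  | succ f ih =>
    intro i s c h1 hf
    by_cases hiv : i ≤ v
    · rw [pvLoopA, if_pos hiv, ih (i + 1) _ (c + 1) (by omega) (by omega)]; ring_nf
    · rw [pvLoopA, if_neg hiv]; simp; omega

-- ===== VERDICT (by name: the statement is the Claim_ definition above) =====
theorem linearMethod_spec : Claim_equal_linearMethod := by
  intro v _
  unfold Spec_linearMethod linearMethod linearMethod_alt
  by_cases hv : v ≤ 0
  · rw [pvLoopA, if_neg (by omega), if_pos hv]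
  · rw [if_neg hv]
    have hs := pvLoopA_sum v (v + 1 - 1).toNat 1 0 0 le_rfl le_rfl
    have hc := pvLoopA_count v (v + 1 - 1).toNat 1 0 0 (by omega) le_rfl
    have hpair : pvLoopA v 1 0 0 = ((pvLoopA v 1 0 0).1, (pvLoopA v 1 0 0).2) := rfl
    rw [hpair, hs, hc]
    norm_num
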